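-- pv_equiv track=rewrite | github.com/dpatel76/PaySphere | src/gps_cdm/orchestration/dynamic_gold_mapper.py | _parse_coalesce_args
-- ===== SOURCE A (Python) =====
-- from typing import Dict, List, Any, Optional, Tuple
--
-- def _parse_coalesce_args(args_str: str) -> List[str]:
--     """
--     Parse COALESCE arguments, handling quoted strings and nested functions.
--
--     Example: "col1, col2, 'default'" -> ['col1', 'col2', "'default'"]
--     """
--     args = []
--     current_arg = ""
--     in_quotes = False
--     paren_depth = 0
--
--     for char in args_str:
--         if char == "'" and paren_depth == 0:
--             in_quotes = not in_quotes
--             current_arg += char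
--         elif char == '(' and not in_quotes:
--             paren_depth += 1
--             current_arg += char
--         elif char == ')' and not in_quotes:
--             paren_depth -= 1
--             current_arg += char
--         elif char == ',' and not in_quotes and paren_depth == 0:
--             args.append(current_arg.strip())
--             current_arg = ""
--         else:
--             current_arg += char
--
--     if current_arg.strip():
--         args.append(current_arg.strip())
--
--     return args
-- ===== SOURCE B (Python) =====
-- from typing import List
--
-- def _parse_coalesce_args(args_str: str) -> List[str]:
--     # Two-pass: record top-level comma positions, then slice between them.
--     cuts = []
--     in_quotes = False
--     paren_depth = 0
--     for i, ch in enumerate(args_str):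
--         if ch == "'" and paren_depth == 0:
--             in_quotes = not in_quotes
--         elif ch == '(' and not in_quotes:
--             paren_depth += 1
--         elif ch == ')' and not in_quotes:
--             paren_depth -= 1
--         elif ch == ',' and not in_quotes and paren_depth == 0:
--             cuts.append(i)
--     bounds = [-1] + cuts + [len(args_str)]
--     segs = [args_str[bounds[j] + 1:bounds[j + 1]].strip()
--             for j in range(len(bounds) - 1)]
--     if not segs[-1]:
--         segs.pop()
--     return segs
-- ===== Notes on version B (the rewrite author's own statement) =====
-- stated objective: alternative
-- what changed: B replaces A's char-by-char segment accumulation with a two-pass scheme: one scan records the indices of top-level commas, then the segments are produced by slicing the input between consecutive recorded bounds and stripping each slice.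
import Mathlib
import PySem

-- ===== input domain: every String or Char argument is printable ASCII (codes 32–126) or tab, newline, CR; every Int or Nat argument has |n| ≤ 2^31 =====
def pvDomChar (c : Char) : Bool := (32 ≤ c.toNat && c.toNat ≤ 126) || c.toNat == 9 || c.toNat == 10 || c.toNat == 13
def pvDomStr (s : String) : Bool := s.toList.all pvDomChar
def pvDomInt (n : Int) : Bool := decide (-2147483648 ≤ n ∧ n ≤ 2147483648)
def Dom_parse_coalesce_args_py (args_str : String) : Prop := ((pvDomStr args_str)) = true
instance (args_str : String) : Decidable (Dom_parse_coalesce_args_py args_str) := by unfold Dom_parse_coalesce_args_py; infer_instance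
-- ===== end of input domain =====

-- B replaces A's char-by-char segment accumulation with a two-pass scheme (record the indices of
-- top-level commas, then slice the input between consecutive bounds): an alternative decomposition, same cost.

-- ===== PORT A =====
-- loop body of A's `for char in args_str`
def pvStepA (st : List String × List Char × Bool × Int) (c : Char) : List String × List Char × Bool × Int :=
  match st with
  | (args, cur, inq, d) =>
    if c = '\'' ∧ d = 0 then (args, cur ++ [c], !inq, d)
    else if c = '(' ∧ inq = false then (args, cur ++ [c], inq, d + 1)
    else if c = ')' ∧ inq = false then (args, cur ++ [c], inq, d - 1)
    else if c = ',' ∧ inq = false ∧ d = 0 then (args ++ [String.ofList (PySem.Chars.strip cur)], [], inq, d)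
    else (args, cur ++ [c], inq, d)

def parse_coalesce_args_py (args_str : String) : List String :=
  let st := args_str.toList.foldl pvStepA ([], [], false, 0)
  if PySem.Chars.strip st.2.1 ≠ [] then st.1 ++ [String.ofList (PySem.Chars.strip st.2.1)] else st.1

-- ===== PORT B =====
-- loop body of B's first pass over `enumerate(args_str)`
def pvStepB (st : List Int × Bool × Int) (p : Int × Char) : List Int × Bool × Int :=
  match st with
  | (cuts, inq, d) =>
    if p.2 = '\'' ∧ d = 0 then (cuts, !inq, d)
    else if p.2 = '(' ∧ inq = false then (cuts, inq, d + 1)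
    else if p.2 = ')' ∧ inq = false then (cuts, inq, d - 1)
    else if p.2 = ',' ∧ inq = false ∧ d = 0 then (cuts ++ [p.1], inq, d)
    else (cuts, inq, d)

def parse_coalesce_args_py_alt (args_str : String) : List String :=
  let cs := args_str.toList
  let st := (PySem.List.enumerate cs 0).foldl pvStepB ([], false, 0)
  let bounds : List Int := [-1] ++ st.1 ++ [PySem.List.len cs]
  let segs : List String := (PySem.List.pyRange 0 (PySem.List.len bounds - 1) 1).map
    (fun j => String.ofList (PySem.Chars.strip (PySem.List.slice cs
      (some (PySem.List.pyGetD bounds j 0 + 1)) (some (PySem.List.pyGetD bounds (j + 1) 0)))))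
  if PySem.List.pyGetD segs (-1) "" = "" then segs.dropLast else segs

-- ===== PRECONDITION & SPEC =====
def Spec_parse_coalesce_args_py (args_str : String) (out : List String) : Prop := out = parse_coalesce_args_py_alt args_str
instance (args_str : String) (out : List String) : Decidable (Spec_parse_coalesce_args_py args_str out) := by unfold Spec_parse_coalesce_args_py; infer_instance

-- ===== CLAIM (what is proved, stated in full; the proofs are below) =====
def Claim_equal_parse_coalesce_args_py : Prop := ∀ (args_str : String), Dom_parse_coalesce_args_py args_str → Spec_parse_coalesce_args_py args_str (parse_coalesce_args_py args_str)

-- ===== LEMMAS AND PROOFS =====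

-- reference: the raw top-level segments of cs, scanning with state (q, d)
def pvMapFirst (f : List Char → List Char) : List (List Char) → List (List Char)
  | [] => []
  | x :: xs => f x :: xs

def pvSplit : List Char → Bool → Int → List (List Char)
  | [], _, _ => [[]]
  | c :: t, q, d =>
    if c = '\'' ∧ d = 0 then pvMapFirst (c :: ·) (pvSplit t (!q) d)
    else if c = '(' ∧ q = false then pvMapFirst (c :: ·) (pvSplit t q (d + 1))
    else if c = ')' ∧ q = false then pvMapFirst (c :: ·) (pvSplit t q (d - 1))
    else if c = ',' ∧ q = false ∧ d = 0 then [] :: pvSplit t q d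
    else pvMapFirst (c :: ·) (pvSplit t q d)

-- reference: absolute positions (from k) of top-level commas
def pvCutsAbs : List Char → Int → Bool → Int → List Int
  | [], _, _, _ => []
  | c :: t, k, q, d =>
    if c = '\'' ∧ d = 0 then pvCutsAbs t (k + 1) (!q) d
    else if c = '(' ∧ q = false then pvCutsAbs t (k + 1) q (d + 1)
    else if c = ')' ∧ q = false then pvCutsAbs t (k + 1) q (d - 1)
    else if c = ',' ∧ q = false ∧ d = 0 then k :: pvCutsAbs t (k + 1) q d
    else pvCutsAbs t (k + 1) q d

-- reference: final (q, d) scanner state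
def pvEnd : List Char → Bool → Int → Bool × Int
  | [], q, d => (q, d)
  | c :: t, q, d =>
    if c = '\'' ∧ d = 0 then pvEnd t (!q) d
    else if c = '(' ∧ q = false then pvEnd t q (d + 1)
    else if c = ')' ∧ q = false then pvEnd t q (d - 1)
    else if c = ',' ∧ q = false ∧ d = 0 then pvEnd t q d
    else pvEnd t q d

-- drop the last segment iff it is empty
def pvFinish (l : List (List Char)) : List (List Char) :=
  match l.getLast? with
  | none => []
  | some x => if x = [] then l.dropLast else l

-- adjacent-pairs fold
def pvAdj {α : Type} (f : Int → Int → α) : List Int → List α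
  | [] => []
  | [_] => []
  | a :: b :: t => f a b :: pvAdj f (b :: t)

theorem pvMapFirst_congr (f g : List Char → List Char) (h : ∀ x, f x = g x) (l : List (List Char)) :
    pvMapFirst f l = pvMapFirst g l := by
  cases l <;> simp [pvMapFirst, h]

theorem pvMapFirst_comp (f g : List Char → List Char) (l : List (List Char)) :
    pvMapFirst f (pvMapFirst g l) = pvMapFirst (fun x => f (g x)) l := by
  cases l <;> simp [pvMapFirst]

theorem pvMapFirst_ne_nil (f : List Char → List Char) (l : List (List Char)) (h : l ≠ []) :
    pvMapFirst f l ≠ [] := by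
  cases l <;> simp [pvMapFirst] at *

theorem pvFinish_concat (l : List (List Char)) (x : List Char) :
    pvFinish (l ++ [x]) = if x = [] then l else l ++ [x] := by
  simp [pvFinish]

theorem pvFinish_cons (x : List Char) (l : List (List Char)) (h : l ≠ []) :
    pvFinish (x :: l) = x :: pvFinish l := by
  rcases List.eq_nil_or_concat l with rfl | ⟨l', y, rfl⟩
  · exact absurd rfl h
  · rw [List.concat_eq_append, show x :: (l' ++ [y]) = (x :: l') ++ [y] from rfl,
      pvFinish_concat, pvFinish_concat]
    split <;> simp

theorem pvAdj_comp {α β : Type} (g : α → β) (f : Int → Int → α) (l : List Int) :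
    pvAdj (fun a b => g (f a b)) l = (pvAdj f l).map g := by
  induction l with
  | nil => rfl
  | cons a t ih => cases t with
    | nil => rfl
    | cons b t' => simp [pvAdj] at ih ⊢; exact ih

theorem pvSplit_ne_nil (cs : List Char) (q : Bool) (d : Int) : pvSplit cs q d ≠ [] := by
  induction cs generalizing q d with
  | nil => simp [pvSplit]
  | cons c t ih =>
    rw [pvSplit]
    split_ifs <;> first | exact pvMapFirst_ne_nil _ _ (ih _ _) | simp

theorem pvCutsAbs_shift (t : List Char) (k : Int) (q : Bool) (d : Int) :
    pvCutsAbs t (k + 1) q d = (pvCutsAbs t k q d).map (· + 1) := by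
  induction t generalizing k q d with
  | nil => simp [pvCutsAbs]
  | cons c t ih =>
    rw [pvCutsAbs, pvCutsAbs]
    split_ifs <;> simp [ih]

theorem pvCutsAbs_nonneg (t : List Char) (k : Int) (q : Bool) (d : Int) :
    ∀ x ∈ pvCutsAbs t k q d, k ≤ x := by
  induction t generalizing k q d with
  | nil => simp [pvCutsAbs]
  | cons c t ih =>
    rw [pvCutsAbs]
    split_ifs <;> intro x hx <;>
      first
      | exact le_trans (by omega) (ih (k + 1) _ _ x hx)
      | (rcases List.mem_cons.mp hx with rfl | hx'
         · omega
         · exact le_trans (by omega) (ih (k + 1) _ _ x hx'))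

theorem pvSliceShift (c : Char) (t : List Char) (a b : Int) (ha : -1 ≤ a) (hb : 0 ≤ b) :
    PySem.List.slice (c :: t) (some (a + 1 + 1)) (some (b + 1)) = PySem.List.slice t (some (a + 1)) (some b) := by
  rw [PySem.List.slice_toNat _ (by omega) (by omega), PySem.List.slice_toNat _ (by omega) hb]
  have h1 : (a + 1 + 1).toNat = (a + 1).toNat + 1 := by omega
  have h2 : (b + 1).toNat = b.toNat + 1 := by omega
  rw [h1, h2, List.drop_succ_cons]
  congr 1
  omega

theorem pvAdj_shift (c : Char) (t : List Char) (l : List Int) (hl : ∀ x ∈ l, 0 ≤ x) :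
    ∀ (a : Int), -1 ≤ a →
    pvAdj (fun a b => PySem.List.slice (c :: t) (some (a + 1)) (some b)) ((a + 1) :: l.map (· + 1))
      = pvAdj (fun a b => PySem.List.slice t (some (a + 1)) (some b)) (a :: l) := by
  induction l with
  | nil => intro a ha; rfl
  | cons b l' ih =>
    intro a ha
    have hb : 0 ≤ b := hl b (by simp)
    simp only [List.map_cons, pvAdj]
    rw [pvSliceShift c t a b ha hb, ih (fun x hx => hl x (by simp [hx])) b (by omega)]

theorem pvLemB1 (t : List Char) (k : Int) (acc : List Int) (q : Bool) (d : Int) :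
    (PySem.List.enumerate t k).foldl pvStepB (acc, q, d)
      = (acc ++ pvCutsAbs t k q d, pvEnd t q d) := by
  induction t generalizing k acc q d with
  | nil => simp [PySem.List.enumerate_nil, pvCutsAbs, pvEnd]
  | cons c t ih =>
    rw [PySem.List.enumerate_cons, List.foldl_cons, pvCutsAbs, pvEnd]
    show List.foldl pvStepB (pvStepB (acc, q, d) (k, c)) _ = _
    rw [pvStepB]
    split_ifs <;> simp [ih]

theorem pvAdjOfRange {α : Type} (f : Int → Int → α) (x : Int) (l : List Int) :
    (PySem.List.pyRange 0 (((x :: l).length : Int) - 1) 1).map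
      (fun j => f (PySem.List.pyGetD (x :: l) j 0) (PySem.List.pyGetD (x :: l) (j + 1) 0))
      = pvAdj f (x :: l) := by
  have key : ∀ (l : List Int) (x : Int),
      (List.range l.length).map
        (fun k => f ((x :: l).getD k 0) ((x :: l).getD (k + 1) 0)) = pvAdj f (x :: l) := by
    intro l
    induction l with
    | nil => intro x; rfl
    | cons y t ih =>
      intro x
      rw [List.length_cons, List.range_succ_eq_map, List.map_cons, List.map_map]
      simp only [Function.comp_def, List.getD_cons_succ, List.getD_cons_zero]
      rw [pvAdj]
      exact congrArg _ (ih y)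
  rw [show ((x :: l).length : Int) - 1 = ((l.length : Nat) : Int) from by
    simp, PySem.List.pyRange_zero_nat]
  rw [← key l x, List.map_map]
  apply List.map_congr_left
  intro k hk
  simp only [Function.comp_apply]
  have h1 : PySem.List.pyGetD (x :: l) ((k : Int)) 0 = (x :: l).getD k 0 :=
    PySem.List.pyGetD_natCast _ _ _
  have h2 : PySem.List.pyGetD (x :: l) ((k : Int) + 1) 0 = (x :: l).getD (k + 1) 0 := by
    rw [show ((k : Int) + 1) = ((k + 1 : Nat) : Int) from by push_cast; ring]
    exact PySem.List.pyGetD_natCast _ _ _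
  rw [h1, h2]

theorem pvSliceZeroZero (cs : List Char) : PySem.List.slice cs (some 0) (some 0) = [] := by
  rw [PySem.List.slice_toNat _ le_rfl le_rfl]; simp

theorem pvSliceFirst (c : Char) (t : List Char) (b : Int) (hb : 0 ≤ b) :
    PySem.List.slice (c :: t) (some 0) (some (b + 1)) = c :: PySem.List.slice t (some 0) (some b) := by
  rw [PySem.List.slice_toNat _ le_rfl (by omega), PySem.List.slice_toNat _ le_rfl hb]
  have : (b + 1).toNat = b.toNat + 1 := by omega
  simp [this]

theorem pvLemG (cs : List Char) (q : Bool) (d : Int) :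
    pvAdj (fun a b => PySem.List.slice cs (some (a + 1)) (some b))
        ((-1) :: (pvCutsAbs cs 0 q d ++ [(cs.length : Int)]))
      = pvSplit cs q d := by
  induction cs generalizing q d with
  | nil =>
    simp only [pvCutsAbs, pvSplit]
    decide
  | cons c t ih =>
    rw [pvCutsAbs, pvSplit]
    have hlen : (((c :: t).length : Nat) : Int) = (t.length : Int) + 1 := by simp
    have hshift : ∀ q' d', pvCutsAbs t (0 + 1) q' d' = (pvCutsAbs t 0 q' d').map (· + 1) :=
      fun q' d' => pvCutsAbs_shift t 0 q' d'
    have hnn : ∀ q' d', ∀ x ∈ pvCutsAbs t 0 q' d' ++ [(t.length : Int)], 0 ≤ x := by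
      intro q' d' x hx
      rcases List.mem_append.mp hx with h | h
      · exact pvCutsAbs_nonneg t 0 q' d' x h
      · simp at h; omega
    -- the non-comma cases share one argument
    have main : ∀ q' d',
        pvAdj (fun a b => PySem.List.slice (c :: t) (some (a + 1)) (some b))
            ((-1) :: pvCutsAbs t (0 + 1) q' d' ++ [((c :: t).length : Int)])
          = pvMapFirst (c :: ·) (pvSplit t q' d') := by
      intro q' d'
      rw [hshift, hlen]
      rw [show ((-1) : Int) :: (pvCutsAbs t 0 q' d').map (· + 1) ++ [(t.length : Int) + 1]
            = (-1) :: ((pvCutsAbs t 0 q' d' ++ [(t.length : Int)]).map (· + 1)) from by simp]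
      rw [← ih q' d']
      cases hX : pvCutsAbs t 0 q' d' with
      | nil =>
        simp only [List.nil_append, List.map_cons, List.map_nil, pvAdj]
        rw [show ((-1 : Int) + 1) = 0 from by norm_num]
        rw [pvSliceFirst c t _ (by positivity)]
        rfl
      | cons r X' =>
        simp only [List.cons_append, List.map_cons, pvAdj]
        have hr : 0 ≤ r := pvCutsAbs_nonneg t 0 q' d' r (by rw [hX]; simp)
        rw [show ((-1 : Int) + 1) = 0 from by norm_num]
        rw [pvSliceFirst c t r hr]
        rw [pvAdj_shift c t (X' ++ [(t.length : Int)])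
          (fun x hx => hnn q' d' x (by rw [hX]; simpa using Or.inr hx)) r (by omega)]
        rfl
    split_ifs with h1 h2 h3 h4
    · exact main (!q) d
    · exact main q (d + 1)
    · exact main q (d - 1)
    · -- comma
      rw [hshift, hlen]
      simp only [List.cons_append, pvAdj]
      rw [show ((-1 : Int) + 1) = 0 from by norm_num, pvSliceZeroZero]
      congr 1
      rw [show ((0 : Int) :: ((pvCutsAbs t 0 q d).map (· + 1) ++ [(t.length : Int) + 1]))
            = ((-1 : Int) + 1) :: ((pvCutsAbs t 0 q d ++ [(t.length : Int)]).map (· + 1)) from by simp]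
      rw [pvAdj_shift c t _ (hnn q d) (-1) le_rfl]
      exact ih q d
    · exact main q d

theorem pvLemA (t : List Char) (args : List String) (cur : List Char) (q : Bool) (d : Int) :
    (let st := t.foldl pvStepA (args, cur, q, d)
     if PySem.Chars.strip st.2.1 ≠ [] then st.1 ++ [String.ofList (PySem.Chars.strip st.2.1)] else st.1)
      = args ++ (pvFinish ((pvMapFirst (cur ++ ·) (pvSplit t q d)).map PySem.Chars.strip)).map String.ofList := by
  induction t generalizing args cur q d with
  | nil =>
    simp only [List.foldl_nil, pvSplit, pvMapFirst, List.map_cons, List.map_nil]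
    by_cases h : PySem.Chars.strip (cur ++ []) = []
    · simp only [List.append_nil] at h
      simp [h, pvFinish]
    · simp only [List.append_nil] at h
      simp [h, pvFinish]
  | cons c t ih =>
    rw [List.foldl_cons, pvSplit]
    show (let st := t.foldl pvStepA (pvStepA (args, cur, q, d) c); _) = _
    rw [pvStepA]
    split_ifs with h1 h2 h3 h4
    · rw [ih, pvMapFirst_comp]
      congr 2
      exact congrArg pvFinish (congrArg (List.map PySem.Chars.strip)
        (pvMapFirst_congr _ _ (fun x => by simp) _))
    · rw [ih, pvMapFirst_comp]
      congr 2
      exact congrArg pvFinish (congrArg (List.map PySem.Chars.strip)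
        (pvMapFirst_congr _ _ (fun x => by simp) _))
    · rw [ih, pvMapFirst_comp]
      congr 2
      exact congrArg pvFinish (congrArg (List.map PySem.Chars.strip)
        (pvMapFirst_congr _ _ (fun x => by simp) _))
    · -- comma
      rw [ih]
      rw [pvMapFirst_congr _ id (fun x => by simp) _,
        show pvMapFirst id (pvSplit t q d) = pvSplit t q d from by
          cases hS : pvSplit t q d <;> simp [pvMapFirst]]
      rw [show pvMapFirst (cur ++ ·) ([] :: pvSplit t q d) = (cur ++ []) :: pvSplit t q d from rfl]
      rw [List.map_cons, pvFinish_cons _ _ (by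
        simp only [ne_eq, List.map_eq_nil_iff]
        exact pvSplit_ne_nil t q d)]
      simp
    · rw [ih, pvMapFirst_comp]
      congr 2
      exact congrArg pvFinish (congrArg (List.map PySem.Chars.strip)
        (pvMapFirst_congr _ _ (fun x => by simp) _))

theorem pvFinB (L : List (List Char)) (h : L ≠ []) :
    (if PySem.List.pyGetD (L.map String.ofList) (-1) "" = "" then (L.map String.ofList).dropLast
     else L.map String.ofList) = (pvFinish L).map String.ofList := by
  rcases List.eq_nil_or_concat L with rfl | ⟨l', x, rfl⟩
  · exact absurd rfl h
  · rw [List.concat_eq_append, List.map_append, List.map_singleton,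
      PySem.List.pyGetD_neg_one_append_singleton, pvFinish_concat]
    by_cases hx : x = []
    · subst hx
      simp
    · rw [if_neg (by simpa using hx), if_neg hx]
      simp

theorem pvMain (args_str : String) :
    parse_coalesce_args_py args_str = parse_coalesce_args_py_alt args_str := by
  unfold parse_coalesce_args_py parse_coalesce_args_py_alt
  dsimp only
  set cs := args_str.toList with hcs
  -- A side
  rw [pvLemA cs [] [] false 0]
  rw [pvMapFirst_congr _ id (fun x => by simp) _,
    show pvMapFirst id (pvSplit cs false 0) = pvSplit cs false 0 from by
      cases hS : pvSplit cs false 0 <;> simp [pvMapFirst]]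
  -- B side
  rw [pvLemB1 cs 0 [] false 0]
  simp only [List.nil_append, PySem.List.len_eq]
  rw [show ([-1] ++ pvCutsAbs cs 0 false 0 ++ [(cs.length : Int)])
        = (-1) :: (pvCutsAbs cs 0 false 0 ++ [(cs.length : Int)]) from by simp]
  rw [pvAdjOfRange (fun a b => String.ofList (PySem.Chars.strip
        (PySem.List.slice cs (some (a + 1)) (some b)))) (-1) (pvCutsAbs cs 0 false 0 ++ [(cs.length : Int)])]
  rw [pvAdj_comp (fun x => String.ofList (PySem.Chars.strip x))
        (fun a b => PySem.List.slice cs (some (a + 1)) (some b)) _]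
  rw [pvLemG cs false 0]
  rw [show (pvSplit cs false 0).map (fun x => String.ofList (PySem.Chars.strip x))
        = ((pvSplit cs false 0).map PySem.Chars.strip).map String.ofList from by
      rw [List.map_map]; rfl]
  rw [pvFinB _ (by simpa using pvSplit_ne_nil cs false 0)]

-- ===== VERDICT (by name: the statement is the Claim_ definition above) =====
theorem parse_coalesce_args_py_spec : Claim_equal_parse_coalesce_args_py := by
  intro args_str _
  unfold Spec_parse_coalesce_args_py
  exact pvMain args_str
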